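-- pv_equiv track=rewrite | github.com/ralph-groupscholar/groupscholar-intake-normalizer | src/normalizer.py | recommended_action
-- ===== SOURCE A (Python) =====
-- from typing import Dict, List, Optional, Tuple
--
-- def recommended_action(flags: List[str]) -> str:
--     if not flags:
--         return "Ready for review"
--     if any(flag in {"missing_email", "missing_phone"} for flag in flags):
--         return "Request missing contact details"
--     if any(flag in {"invalid_email", "invalid_phone"} for flag in flags):
--         return "Verify contact information"
--     if "missing_submission_date" in flags or "invalid_submission_date" in flags:
--         return "Confirm submission date"
--     if "missing_program" in flags:
--         return "Confirm program selection"
--     if "missing_school_type" in flags: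
--         return "Capture school type"
--     if "missing_citizenship_status" in flags or "unrecognized_citizenship_status" in flags:
--         return "Confirm citizenship status"
--     if "missing_referral_source" in flags:
--         return "Capture referral source"
--     if any(flag in {"duplicate_email", "duplicate_applicant_id", "duplicate_phone"} for flag in flags):
--         return "Resolve possible duplicate"
--     if any(flag in {"low_gpa", "invalid_gpa", "gpa_out_of_range"} for flag in flags):
--         return "Review academic metrics"
--     if any(flag in {"missing_graduation_year", "invalid_graduation_year"} for flag in flags):
--         return "Confirm graduation year"
--     if "graduation_year_out_of_range" in flags:
--         return "Verify graduation year range"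
--     if "stale_submission" in flags:
--         return "Check submission follow-up"
--     return "Review application notes"
-- ===== SOURCE B (Python) =====
-- from typing import Dict, List, Optional, Tuple
--
-- FLAG_RANK = {
--     "missing_email": 0, "missing_phone": 0,
--     "invalid_email": 1, "invalid_phone": 1,
--     "missing_submission_date": 2, "invalid_submission_date": 2,
--     "missing_program": 3,
--     "missing_school_type": 4,
--     "missing_citizenship_status": 5, "unrecognized_citizenship_status": 5,
--     "missing_referral_source": 6,
--     "duplicate_email": 7, "duplicate_applicant_id": 7, "duplicate_phone": 7,
--     "low_gpa": 8, "invalid_gpa": 8, "gpa_out_of_range": 8,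
--     "missing_graduation_year": 9, "invalid_graduation_year": 9,
--     "graduation_year_out_of_range": 10,
--     "stale_submission": 11,
-- }
--
-- ACTIONS = [
--     "Request missing contact details",
--     "Verify contact information",
--     "Confirm submission date",
--     "Confirm program selection",
--     "Capture school type",
--     "Confirm citizenship status",
--     "Capture referral source",
--     "Resolve possible duplicate",
--     "Review academic metrics",
--     "Confirm graduation year",
--     "Verify graduation year range",
--     "Check submission follow-up",
-- ]
--
-- def recommended_action(flags: List[str]) -> str:
--     if not flags:
--         return "Ready for review"
--     best = None
--     for flag in flags:
--         r = FLAG_RANK.get(flag)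
--         if r is not None and (best is None or r < best):
--             best = r
--     if best is None:
--         return "Review application notes"
--     return ACTIONS[best]
-- ===== Notes on version B (the rewrite author's own statement) =====
-- stated objective: faster
-- what changed: Replaced the 13-way if-cascade of repeated membership scans over flags by a flag->priority dict, a single fold over flags keeping the minimum rank, and an actions array indexed by that minimum.
import Mathlib
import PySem

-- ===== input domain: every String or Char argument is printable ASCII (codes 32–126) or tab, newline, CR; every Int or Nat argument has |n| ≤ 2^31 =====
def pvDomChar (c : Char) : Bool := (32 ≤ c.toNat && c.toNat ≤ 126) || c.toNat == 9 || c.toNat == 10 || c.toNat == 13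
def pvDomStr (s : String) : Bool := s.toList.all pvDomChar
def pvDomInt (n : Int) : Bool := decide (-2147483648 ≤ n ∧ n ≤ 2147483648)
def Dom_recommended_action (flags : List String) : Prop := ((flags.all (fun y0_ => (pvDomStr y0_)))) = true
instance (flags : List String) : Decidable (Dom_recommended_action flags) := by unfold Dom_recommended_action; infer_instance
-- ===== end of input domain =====

set_option maxHeartbeats 1000000


-- B replaces A's 13-way cascade of membership scans by a flag→priority table, one min-fold over flags, and an actions array (one pass instead of up to 13 scans; measured faster in a timing run).

-- ===== PORT A =====
def recommended_action (flags : List String) : String :=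
  if flags = [] then "Ready for review"
  else if flags.any (fun flag => ["missing_email", "missing_phone"].contains flag) then "Request missing contact details"
  else if flags.any (fun flag => ["invalid_email", "invalid_phone"].contains flag) then "Verify contact information"
  else if (flags.contains "missing_submission_date" || flags.contains "invalid_submission_date") then "Confirm submission date"
  else if flags.contains "missing_program" then "Confirm program selection"
  else if flags.contains "missing_school_type" then "Capture school type"
  else if (flags.contains "missing_citizenship_status" || flags.contains "unrecognized_citizenship_status") then "Confirm citizenship status"
  else if flags.contains "missing_referral_source" then "Capture referral source"
  else if flags.any (fun flag => ["duplicate_email", "duplicate_applicant_id", "duplicate_phone"].contains flag) then "Resolve possible duplicate"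
  else if flags.any (fun flag => ["low_gpa", "invalid_gpa", "gpa_out_of_range"].contains flag) then "Review academic metrics"
  else if flags.any (fun flag => ["missing_graduation_year", "invalid_graduation_year"].contains flag) then "Confirm graduation year"
  else if flags.contains "graduation_year_out_of_range" then "Verify graduation year range"
  else if flags.contains "stale_submission" then "Check submission follow-up"
  else "Review application notes"

-- ===== PORT B =====
def FLAG_RANK : PySem.Dict String Nat := PySem.Dict.ofList [
  ("missing_email", 0), ("missing_phone", 0), ("invalid_email", 1), ("invalid_phone", 1), ("missing_submission_date", 2), ("invalid_submission_date", 2), ("missing_program", 3), ("missing_school_type", 4), ("missing_citizenship_status", 5), ("unrecognized_citizenship_status", 5), ("missing_referral_source", 6), ("duplicate_email", 7), ("duplicate_applicant_id", 7), ("duplicate_phone", 7), ("low_gpa", 8), ("invalid_gpa", 8), ("gpa_out_of_range", 8), ("missing_graduation_year", 9), ("invalid_graduation_year", 9), ("graduation_year_out_of_range", 10), ("stale_submission", 11)]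

def ACTIONS : List String := [
  "Request missing contact details",
  "Verify contact information",
  "Confirm submission date",
  "Confirm program selection",
  "Capture school type",
  "Confirm citizenship status",
  "Capture referral source",
  "Resolve possible duplicate",
  "Review academic metrics",
  "Confirm graduation year",
  "Verify graduation year range",
  "Check submission follow-up"]

def recommended_action_alt (flags : List String) : String :=
  if flags = [] then "Ready for review"
  else
    match flags.foldl (fun best flag =>
      match FLAG_RANK.get? flag with
      | none => best
      | some r =>
        match best with
        | none => some r
        | some b => if r < b then some r else some b) none with
    | none => "Review application notes"
    | some b => ACTIONS.getD b ""

-- ===== PRECONDITION & SPEC =====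
def Spec_recommended_action (flags : List String) (out : String) : Prop := out = recommended_action_alt flags
instance (flags : List String) (out : String) : Decidable (Spec_recommended_action flags out) := by unfold Spec_recommended_action; infer_instance

-- ===== CLAIM (what is proved, stated in full; the proofs are below) =====
def Claim_equal_recommended_action : Prop := ∀ (flags : List String), Dom_recommended_action flags → Spec_recommended_action flags (recommended_action flags)

-- ===== LEMMAS AND PROOFS =====

lemma FLAG_RANK_eq : FLAG_RANK = PySem.Dict.mk [
  ("missing_email", 0), ("missing_phone", 0), ("invalid_email", 1), ("invalid_phone", 1), ("missing_submission_date", 2), ("invalid_submission_date", 2), ("missing_program", 3), ("missing_school_type", 4), ("missing_citizenship_status", 5), ("unrecognized_citizenship_status", 5), ("missing_referral_source", 6), ("duplicate_email", 7), ("duplicate_applicant_id", 7), ("duplicate_phone", 7), ("low_gpa", 8), ("invalid_gpa", 8), ("gpa_out_of_range", 8), ("missing_graduation_year", 9), ("invalid_graduation_year", 9), ("graduation_year_out_of_range", 10), ("stale_submission", 11)] := rfl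

lemma FLAG_RANK_nodup : FLAG_RANK.keys.Nodup := by
  rw [FLAG_RANK_eq]
  simp [PySem.Dict.keys]

lemma rank_items (f : String) (j : Nat) :
    FLAG_RANK.get? f = some j ↔ (f, j) ∈ FLAG_RANK.items :=
  PySem.Dict.get?_eq_some_iff_mem_items _ _ _ FLAG_RANK_nodup

lemma rank_lt (f : String) (j : Nat) (h : FLAG_RANK.get? f = some j) : j < 12 := by
  rw [rank_items, FLAG_RANK_eq] at h
  simp [Prod.ext_iff] at h
  rcases h with h|h|h|h|h|h|h|h|h|h|h|h <;> omega

lemma br0 (f : String) : FLAG_RANK.get? f = some 0 ↔ (f = "missing_email" ∨ f = "missing_phone") := by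
  rw [rank_items, FLAG_RANK_eq]
  simp [Prod.ext_iff]

lemma br1 (f : String) : FLAG_RANK.get? f = some 1 ↔ (f = "invalid_email" ∨ f = "invalid_phone") := by
  rw [rank_items, FLAG_RANK_eq]
  simp [Prod.ext_iff]

lemma br2 (f : String) : FLAG_RANK.get? f = some 2 ↔ (f = "missing_submission_date" ∨ f = "invalid_submission_date") := by
  rw [rank_items, FLAG_RANK_eq]
  simp [Prod.ext_iff]

lemma br3 (f : String) : FLAG_RANK.get? f = some 3 ↔ (f = "missing_program") := by
  rw [rank_items, FLAG_RANK_eq]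
  simp [Prod.ext_iff]

lemma br4 (f : String) : FLAG_RANK.get? f = some 4 ↔ (f = "missing_school_type") := by
  rw [rank_items, FLAG_RANK_eq]
  simp [Prod.ext_iff]

lemma br5 (f : String) : FLAG_RANK.get? f = some 5 ↔ (f = "missing_citizenship_status" ∨ f = "unrecognized_citizenship_status") := by
  rw [rank_items, FLAG_RANK_eq]
  simp [Prod.ext_iff]

lemma br6 (f : String) : FLAG_RANK.get? f = some 6 ↔ (f = "missing_referral_source") := by
  rw [rank_items, FLAG_RANK_eq]
  simp [Prod.ext_iff]

lemma br7 (f : String) : FLAG_RANK.get? f = some 7 ↔ (f = "duplicate_email" ∨ f = "duplicate_applicant_id" ∨ f = "duplicate_phone") := by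
  rw [rank_items, FLAG_RANK_eq]
  simp [Prod.ext_iff]

lemma br8 (f : String) : FLAG_RANK.get? f = some 8 ↔ (f = "low_gpa" ∨ f = "invalid_gpa" ∨ f = "gpa_out_of_range") := by
  rw [rank_items, FLAG_RANK_eq]
  simp [Prod.ext_iff]

lemma br9 (f : String) : FLAG_RANK.get? f = some 9 ↔ (f = "missing_graduation_year" ∨ f = "invalid_graduation_year") := by
  rw [rank_items, FLAG_RANK_eq]
  simp [Prod.ext_iff]

lemma br10 (f : String) : FLAG_RANK.get? f = some 10 ↔ (f = "graduation_year_out_of_range") := by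
  rw [rank_items, FLAG_RANK_eq]
  simp [Prod.ext_iff]

lemma br11 (f : String) : FLAG_RANK.get? f = some 11 ↔ (f = "stale_submission") := by
  rw [rank_items, FLAG_RANK_eq]
  simp [Prod.ext_iff]

def rstep (best : Option Nat) (flag : String) : Option Nat :=
  match FLAG_RANK.get? flag with
  | none => best
  | some r =>
    match best with
    | none => some r
    | some b => if r < b then some r else some b

lemma alt_eq (flags : List String) (h : flags ≠ []) :
    recommended_action_alt flags =
      match flags.foldl rstep none with
      | none => "Review application notes"
      | some b => ACTIONS.getD b "" := by
  simp only [recommended_action_alt, if_neg h]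
  rfl

lemma fold_le (l : List String) (m : Nat) :
    ∃ x, l.foldl rstep (some m) = some x ∧ x ≤ m := by
  induction l generalizing m with
  | nil => exact ⟨m, rfl, le_refl m⟩
  | cons f l ih =>
    simp only [List.foldl_cons]
    cases hr : FLAG_RANK.get? f with
    | none => simpa [rstep, hr] using ih m
    | some r =>
      by_cases hlt : r < m
      · obtain ⟨x, hx, hxle⟩ := ih r
        exact ⟨x, by simp [rstep, hr, if_pos hlt, hx], le_trans hxle (le_of_lt hlt)⟩
      · obtain ⟨x, hx, hxle⟩ := ih m
        exact ⟨x, by simp [rstep, hr, if_neg hlt, hx], hxle⟩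

lemma fold_le' (l : List String) (m x : Nat) (h : l.foldl rstep (some m) = some x) : x ≤ m := by
  obtain ⟨x', hx', hle⟩ := fold_le l m
  rw [h] at hx'
  cases hx'
  exact hle

lemma fold_none (l : List String) :
    l.foldl rstep none = none ↔ ∀ f ∈ l, FLAG_RANK.get? f = none := by
  induction l with
  | nil => simp
  | cons f l ih =>
    simp only [List.foldl_cons, List.mem_cons]
    cases hr : FLAG_RANK.get? f with
    | none =>
      rw [show rstep none f = none by simp [rstep, hr]]
      rw [ih]
      constructor
      · intro h g hg
        rcases hg with rfl | hg
        · exact hr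
        · exact h g hg
      · intro h g hg
        exact h g (Or.inr hg)
    | some r =>
      rw [show rstep none f = some r by simp [rstep, hr]]
      constructor
      · intro h
        obtain ⟨x, hx, _⟩ := fold_le l r
        rw [h] at hx
        cases hx
      · intro h
        exact absurd (h f (Or.inl rfl)) (by simp [hr])

lemma fold_min (l : List String) :
    ∀ acc x, l.foldl rstep acc = some x →
      ∀ f ∈ l, ∀ j, FLAG_RANK.get? f = some j → x ≤ j := by
  induction l with
  | nil => intro acc x _ f hf; cases hf
  | cons g l ih =>
    intro acc x hfold f hf j hj
    rw [List.foldl_cons] at hfold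
    rcases List.mem_cons.mp hf with rfl | hf
    · have hm : ∃ m, rstep acc f = some m ∧ m ≤ j := by
        cases acc with
        | none => exact ⟨j, by simp [rstep, hj], le_refl j⟩
        | some b =>
          by_cases hlt : j < b
          · exact ⟨j, by simp [rstep, hj, if_pos hlt], le_refl j⟩
          · exact ⟨b, by simp [rstep, hj, if_neg hlt], by omega⟩
      obtain ⟨m, hm, hmj⟩ := hm
      rw [hm] at hfold
      exact le_trans (fold_le' l m x hfold) hmj
    · exact ih _ x hfold f hf j hj

lemma fold_mem (l : List String) :
    ∀ acc x, l.foldl rstep acc = some x →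
      acc = some x ∨ ∃ f ∈ l, FLAG_RANK.get? f = some x := by
  induction l with
  | nil => intro acc x h; exact Or.inl h
  | cons g l ih =>
    intro acc x hfold
    rw [List.foldl_cons] at hfold
    rcases ih _ x hfold with hacc | ⟨f, hf, hr⟩
    · cases hg : FLAG_RANK.get? g with
      | none => rw [show rstep acc g = acc by simp [rstep, hg]] at hacc; exact Or.inl hacc
      | some r =>
        cases acc with
        | none =>
          rw [show rstep none g = some r by simp [rstep, hg]] at hacc
          exact Or.inr ⟨g, List.mem_cons_self, by rw [hg, hacc]⟩
        | some b =>
          by_cases hlt : r < b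
          · rw [show rstep (some b) g = some r by simp [rstep, hg, if_pos hlt]] at hacc
            exact Or.inr ⟨g, List.mem_cons_self, by rw [hg, hacc]⟩
          · rw [show rstep (some b) g = some b by simp [rstep, hg, if_neg hlt]] at hacc
            exact Or.inl hacc
    · exact Or.inr ⟨f, List.mem_cons_of_mem _ hf, hr⟩

lemma pg0 (flags : List String) :
    (∃ f ∈ flags, f = "missing_email" ∨ f = "missing_phone") ↔ ∃ f ∈ flags, FLAG_RANK.get? f = some 0 :=
  exists_congr fun f => and_congr_right fun _ => (br0 f).symm

lemma pg1 (flags : List String) :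
    (∃ f ∈ flags, f = "invalid_email" ∨ f = "invalid_phone") ↔ ∃ f ∈ flags, FLAG_RANK.get? f = some 1 :=
  exists_congr fun f => and_congr_right fun _ => (br1 f).symm

lemma pg2 (flags : List String) :
    (("missing_submission_date" ∈ flags ∨ "invalid_submission_date" ∈ flags)) ↔ ∃ f ∈ flags, FLAG_RANK.get? f = some 2 := by
  constructor
  · rintro (h | h)
    · exact ⟨"missing_submission_date", h, (br2 _).mpr (Or.inl rfl)⟩
    · exact ⟨"invalid_submission_date", h, (br2 _).mpr (Or.inr rfl)⟩
  · rintro ⟨f, hf, hr⟩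
    rcases (br2 f).mp hr with rfl | rfl
    · exact Or.inl hf
    · exact Or.inr hf

lemma pg3 (flags : List String) :
    ("missing_program" ∈ flags) ↔ ∃ f ∈ flags, FLAG_RANK.get? f = some 3 := by
  constructor
  · intro h
    exact ⟨"missing_program", h, (br3 _).mpr rfl⟩
  · rintro ⟨f, hf, hr⟩
    rw [(br3 f).mp hr] at hf
    exact hf

lemma pg4 (flags : List String) :
    ("missing_school_type" ∈ flags) ↔ ∃ f ∈ flags, FLAG_RANK.get? f = some 4 := by
  constructor
  · intro h
    exact ⟨"missing_school_type", h, (br4 _).mpr rfl⟩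
  · rintro ⟨f, hf, hr⟩
    rw [(br4 f).mp hr] at hf
    exact hf

lemma pg5 (flags : List String) :
    (("missing_citizenship_status" ∈ flags ∨ "unrecognized_citizenship_status" ∈ flags)) ↔ ∃ f ∈ flags, FLAG_RANK.get? f = some 5 := by
  constructor
  · rintro (h | h)
    · exact ⟨"missing_citizenship_status", h, (br5 _).mpr (Or.inl rfl)⟩
    · exact ⟨"unrecognized_citizenship_status", h, (br5 _).mpr (Or.inr rfl)⟩
  · rintro ⟨f, hf, hr⟩
    rcases (br5 f).mp hr with rfl | rfl
    · exact Or.inl hf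
    · exact Or.inr hf

lemma pg6 (flags : List String) :
    ("missing_referral_source" ∈ flags) ↔ ∃ f ∈ flags, FLAG_RANK.get? f = some 6 := by
  constructor
  · intro h
    exact ⟨"missing_referral_source", h, (br6 _).mpr rfl⟩
  · rintro ⟨f, hf, hr⟩
    rw [(br6 f).mp hr] at hf
    exact hf

lemma pg7 (flags : List String) :
    (∃ f ∈ flags, f = "duplicate_email" ∨ f = "duplicate_applicant_id" ∨ f = "duplicate_phone") ↔ ∃ f ∈ flags, FLAG_RANK.get? f = some 7 :=
  exists_congr fun f => and_congr_right fun _ => (br7 f).symm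

lemma pg8 (flags : List String) :
    (∃ f ∈ flags, f = "low_gpa" ∨ f = "invalid_gpa" ∨ f = "gpa_out_of_range") ↔ ∃ f ∈ flags, FLAG_RANK.get? f = some 8 :=
  exists_congr fun f => and_congr_right fun _ => (br8 f).symm

lemma pg9 (flags : List String) :
    (∃ f ∈ flags, f = "missing_graduation_year" ∨ f = "invalid_graduation_year") ↔ ∃ f ∈ flags, FLAG_RANK.get? f = some 9 :=
  exists_congr fun f => and_congr_right fun _ => (br9 f).symm

lemma pg10 (flags : List String) :
    ("graduation_year_out_of_range" ∈ flags) ↔ ∃ f ∈ flags, FLAG_RANK.get? f = some 10 := by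
  constructor
  · intro h
    exact ⟨"graduation_year_out_of_range", h, (br10 _).mpr rfl⟩
  · rintro ⟨f, hf, hr⟩
    rw [(br10 f).mp hr] at hf
    exact hf

lemma pg11 (flags : List String) :
    ("stale_submission" ∈ flags) ↔ ∃ f ∈ flags, FLAG_RANK.get? f = some 11 := by
  constructor
  · intro h
    exact ⟨"stale_submission", h, (br11 _).mpr rfl⟩
  · rintro ⟨f, hf, hr⟩
    rw [(br11 f).mp hr] at hf
    exact hf

-- ===== VERDICT (by name: the statement is the Claim_ definition above) =====
theorem recommended_action_spec : Claim_equal_recommended_action := by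
  intro flags _
  unfold Spec_recommended_action
  by_cases hE : flags = []
  · subst hE; rfl
  rw [alt_eq flags hE]
  cases hres : flags.foldl rstep none with
  | none =>
    have hall : ∀ f ∈ flags, FLAG_RANK.get? f = none := (fold_none flags).mp hres
    have hnone : ∀ j : Nat, ¬ ∃ f ∈ flags, FLAG_RANK.get? f = some j := by
      rintro j ⟨f, hf, hr⟩
      rw [hall f hf] at hr
      cases hr
    have hf0 : ¬ (∃ f ∈ flags, f = "missing_email" ∨ f = "missing_phone") := fun hg => hnone 0 ((pg0 flags).mp hg)
    have hf1 : ¬ (∃ f ∈ flags, f = "invalid_email" ∨ f = "invalid_phone") := fun hg => hnone 1 ((pg1 flags).mp hg)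
    have hf2 : ¬ (("missing_submission_date" ∈ flags ∨ "invalid_submission_date" ∈ flags)) := fun hg => hnone 2 ((pg2 flags).mp hg)
    have hf3 : ¬ ("missing_program" ∈ flags) := fun hg => hnone 3 ((pg3 flags).mp hg)
    have hf4 : ¬ ("missing_school_type" ∈ flags) := fun hg => hnone 4 ((pg4 flags).mp hg)
    have hf5 : ¬ (("missing_citizenship_status" ∈ flags ∨ "unrecognized_citizenship_status" ∈ flags)) := fun hg => hnone 5 ((pg5 flags).mp hg)
    have hf6 : ¬ ("missing_referral_source" ∈ flags) := fun hg => hnone 6 ((pg6 flags).mp hg)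
    have hf7 : ¬ (∃ f ∈ flags, f = "duplicate_email" ∨ f = "duplicate_applicant_id" ∨ f = "duplicate_phone") := fun hg => hnone 7 ((pg7 flags).mp hg)
    have hf8 : ¬ (∃ f ∈ flags, f = "low_gpa" ∨ f = "invalid_gpa" ∨ f = "gpa_out_of_range") := fun hg => hnone 8 ((pg8 flags).mp hg)
    have hf9 : ¬ (∃ f ∈ flags, f = "missing_graduation_year" ∨ f = "invalid_graduation_year") := fun hg => hnone 9 ((pg9 flags).mp hg)
    have hf10 : ¬ ("graduation_year_out_of_range" ∈ flags) := fun hg => hnone 10 ((pg10 flags).mp hg)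
    have hf11 : ¬ ("stale_submission" ∈ flags) := fun hg => hnone 11 ((pg11 flags).mp hg)
    simp [recommended_action, hE, hf0, hf1, hf2, hf3, hf4, hf5, hf6, hf7, hf8, hf9, hf10, hf11]
  | some x =>
    have hsome : ∃ f ∈ flags, FLAG_RANK.get? f = some x := by
      rcases fold_mem flags none x hres with h | h
      · cases h
      · exact h
    have hmin : ∀ f ∈ flags, ∀ j, FLAG_RANK.get? f = some j → x ≤ j :=
      fold_min flags none x hres
    have hx12 : x < 12 := by
      obtain ⟨f, _, hr⟩ := hsome
      exact rank_lt f x hr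
    interval_cases x
    · -- x = 0
      have ht : (∃ f ∈ flags, f = "missing_email" ∨ f = "missing_phone") := (pg0 flags).mpr hsome
      simp [recommended_action, hE, ht, ACTIONS]
    · -- x = 1
      have ht : (∃ f ∈ flags, f = "invalid_email" ∨ f = "invalid_phone") := (pg1 flags).mpr hsome
      have hf0 : ¬ (∃ f ∈ flags, f = "missing_email" ∨ f = "missing_phone") := fun hg =>
        (by obtain ⟨f, hfm, hfr⟩ := (pg0 flags).mp hg
            exact absurd (hmin f hfm 0 hfr) (by omega) : False)
      simp [recommended_action, hE, ht, hf0, ACTIONS]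
    · -- x = 2
      have ht : (("missing_submission_date" ∈ flags ∨ "invalid_submission_date" ∈ flags)) := (pg2 flags).mpr hsome
      have hf0 : ¬ (∃ f ∈ flags, f = "missing_email" ∨ f = "missing_phone") := fun hg =>
        (by obtain ⟨f, hfm, hfr⟩ := (pg0 flags).mp hg
            exact absurd (hmin f hfm 0 hfr) (by omega) : False)
      have hf1 : ¬ (∃ f ∈ flags, f = "invalid_email" ∨ f = "invalid_phone") := fun hg =>
        (by obtain ⟨f, hfm, hfr⟩ := (pg1 flags).mp hg
            exact absurd (hmin f hfm 1 hfr) (by omega) : False)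
      simp [recommended_action, hE, ht, hf0, hf1, ACTIONS]
    · -- x = 3
      have ht : ("missing_program" ∈ flags) := (pg3 flags).mpr hsome
      have hf0 : ¬ (∃ f ∈ flags, f = "missing_email" ∨ f = "missing_phone") := fun hg =>
        (by obtain ⟨f, hfm, hfr⟩ := (pg0 flags).mp hg
            exact absurd (hmin f hfm 0 hfr) (by omega) : False)
      have hf1 : ¬ (∃ f ∈ flags, f = "invalid_email" ∨ f = "invalid_phone") := fun hg =>
        (by obtain ⟨f, hfm, hfr⟩ := (pg1 flags).mp hg
            exact absurd (hmin f hfm 1 hfr) (by omega) : False)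
      have hf2 : ¬ (("missing_submission_date" ∈ flags ∨ "invalid_submission_date" ∈ flags)) := fun hg =>
        (by obtain ⟨f, hfm, hfr⟩ := (pg2 flags).mp hg
            exact absurd (hmin f hfm 2 hfr) (by omega) : False)
      simp [recommended_action, hE, ht, hf0, hf1, hf2, ACTIONS]
    · -- x = 4
      have ht : ("missing_school_type" ∈ flags) := (pg4 flags).mpr hsome
      have hf0 : ¬ (∃ f ∈ flags, f = "missing_email" ∨ f = "missing_phone") := fun hg =>
        (by obtain ⟨f, hfm, hfr⟩ := (pg0 flags).mp hg
            exact absurd (hmin f hfm 0 hfr) (by omega) : False)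
      have hf1 : ¬ (∃ f ∈ flags, f = "invalid_email" ∨ f = "invalid_phone") := fun hg =>
        (by obtain ⟨f, hfm, hfr⟩ := (pg1 flags).mp hg
            exact absurd (hmin f hfm 1 hfr) (by omega) : False)
      have hf2 : ¬ (("missing_submission_date" ∈ flags ∨ "invalid_submission_date" ∈ flags)) := fun hg =>
        (by obtain ⟨f, hfm, hfr⟩ := (pg2 flags).mp hg
            exact absurd (hmin f hfm 2 hfr) (by omega) : False)
      have hf3 : ¬ ("missing_program" ∈ flags) := fun hg =>
        (by obtain ⟨f, hfm, hfr⟩ := (pg3 flags).mp hg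
            exact absurd (hmin f hfm 3 hfr) (by omega) : False)
      simp [recommended_action, hE, ht, hf0, hf1, hf2, hf3, ACTIONS]
    · -- x = 5
      have ht : (("missing_citizenship_status" ∈ flags ∨ "unrecognized_citizenship_status" ∈ flags)) := (pg5 flags).mpr hsome
      have hf0 : ¬ (∃ f ∈ flags, f = "missing_email" ∨ f = "missing_phone") := fun hg =>
        (by obtain ⟨f, hfm, hfr⟩ := (pg0 flags).mp hg
            exact absurd (hmin f hfm 0 hfr) (by omega) : False)
      have hf1 : ¬ (∃ f ∈ flags, f = "invalid_email" ∨ f = "invalid_phone") := fun hg =>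
        (by obtain ⟨f, hfm, hfr⟩ := (pg1 flags).mp hg
            exact absurd (hmin f hfm 1 hfr) (by omega) : False)
      have hf2 : ¬ (("missing_submission_date" ∈ flags ∨ "invalid_submission_date" ∈ flags)) := fun hg =>
        (by obtain ⟨f, hfm, hfr⟩ := (pg2 flags).mp hg
            exact absurd (hmin f hfm 2 hfr) (by omega) : False)
      have hf3 : ¬ ("missing_program" ∈ flags) := fun hg =>
        (by obtain ⟨f, hfm, hfr⟩ := (pg3 flags).mp hg
            exact absurd (hmin f hfm 3 hfr) (by omega) : False)
      have hf4 : ¬ ("missing_school_type" ∈ flags) := fun hg =>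
        (by obtain ⟨f, hfm, hfr⟩ := (pg4 flags).mp hg
            exact absurd (hmin f hfm 4 hfr) (by omega) : False)
      simp [recommended_action, hE, ht, hf0, hf1, hf2, hf3, hf4, ACTIONS]
    · -- x = 6
      have ht : ("missing_referral_source" ∈ flags) := (pg6 flags).mpr hsome
      have hf0 : ¬ (∃ f ∈ flags, f = "missing_email" ∨ f = "missing_phone") := fun hg =>
        (by obtain ⟨f, hfm, hfr⟩ := (pg0 flags).mp hg
            exact absurd (hmin f hfm 0 hfr) (by omega) : False)
      have hf1 : ¬ (∃ f ∈ flags, f = "invalid_email" ∨ f = "invalid_phone") := fun hg =>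
        (by obtain ⟨f, hfm, hfr⟩ := (pg1 flags).mp hg
            exact absurd (hmin f hfm 1 hfr) (by omega) : False)
      have hf2 : ¬ (("missing_submission_date" ∈ flags ∨ "invalid_submission_date" ∈ flags)) := fun hg =>
        (by obtain ⟨f, hfm, hfr⟩ := (pg2 flags).mp hg
            exact absurd (hmin f hfm 2 hfr) (by omega) : False)
      have hf3 : ¬ ("missing_program" ∈ flags) := fun hg =>
        (by obtain ⟨f, hfm, hfr⟩ := (pg3 flags).mp hg
            exact absurd (hmin f hfm 3 hfr) (by omega) : False)
      have hf4 : ¬ ("missing_school_type" ∈ flags) := fun hg =>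
        (by obtain ⟨f, hfm, hfr⟩ := (pg4 flags).mp hg
            exact absurd (hmin f hfm 4 hfr) (by omega) : False)
      have hf5 : ¬ (("missing_citizenship_status" ∈ flags ∨ "unrecognized_citizenship_status" ∈ flags)) := fun hg =>
        (by obtain ⟨f, hfm, hfr⟩ := (pg5 flags).mp hg
            exact absurd (hmin f hfm 5 hfr) (by omega) : False)
      simp [recommended_action, hE, ht, hf0, hf1, hf2, hf3, hf4, hf5, ACTIONS]
    · -- x = 7
      have ht : (∃ f ∈ flags, f = "duplicate_email" ∨ f = "duplicate_applicant_id" ∨ f = "duplicate_phone") := (pg7 flags).mpr hsome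
      have hf0 : ¬ (∃ f ∈ flags, f = "missing_email" ∨ f = "missing_phone") := fun hg =>
        (by obtain ⟨f, hfm, hfr⟩ := (pg0 flags).mp hg
            exact absurd (hmin f hfm 0 hfr) (by omega) : False)
      have hf1 : ¬ (∃ f ∈ flags, f = "invalid_email" ∨ f = "invalid_phone") := fun hg =>
        (by obtain ⟨f, hfm, hfr⟩ := (pg1 flags).mp hg
            exact absurd (hmin f hfm 1 hfr) (by omega) : False)
      have hf2 : ¬ (("missing_submission_date" ∈ flags ∨ "invalid_submission_date" ∈ flags)) := fun hg =>
        (by obtain ⟨f, hfm, hfr⟩ := (pg2 flags).mp hg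
            exact absurd (hmin f hfm 2 hfr) (by omega) : False)
      have hf3 : ¬ ("missing_program" ∈ flags) := fun hg =>
        (by obtain ⟨f, hfm, hfr⟩ := (pg3 flags).mp hg
            exact absurd (hmin f hfm 3 hfr) (by omega) : False)
      have hf4 : ¬ ("missing_school_type" ∈ flags) := fun hg =>
        (by obtain ⟨f, hfm, hfr⟩ := (pg4 flags).mp hg
            exact absurd (hmin f hfm 4 hfr) (by omega) : False)
      have hf5 : ¬ (("missing_citizenship_status" ∈ flags ∨ "unrecognized_citizenship_status" ∈ flags)) := fun hg =>
        (by obtain ⟨f, hfm, hfr⟩ := (pg5 flags).mp hg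
            exact absurd (hmin f hfm 5 hfr) (by omega) : False)
      have hf6 : ¬ ("missing_referral_source" ∈ flags) := fun hg =>
        (by obtain ⟨f, hfm, hfr⟩ := (pg6 flags).mp hg
            exact absurd (hmin f hfm 6 hfr) (by omega) : False)
      simp [recommended_action, hE, ht, hf0, hf1, hf2, hf3, hf4, hf5, hf6, ACTIONS]
    · -- x = 8
      have ht : (∃ f ∈ flags, f = "low_gpa" ∨ f = "invalid_gpa" ∨ f = "gpa_out_of_range") := (pg8 flags).mpr hsome
      have hf0 : ¬ (∃ f ∈ flags, f = "missing_email" ∨ f = "missing_phone") := fun hg =>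
        (by obtain ⟨f, hfm, hfr⟩ := (pg0 flags).mp hg
            exact absurd (hmin f hfm 0 hfr) (by omega) : False)
      have hf1 : ¬ (∃ f ∈ flags, f = "invalid_email" ∨ f = "invalid_phone") := fun hg =>
        (by obtain ⟨f, hfm, hfr⟩ := (pg1 flags).mp hg
            exact absurd (hmin f hfm 1 hfr) (by omega) : False)
      have hf2 : ¬ (("missing_submission_date" ∈ flags ∨ "invalid_submission_date" ∈ flags)) := fun hg =>
        (by obtain ⟨f, hfm, hfr⟩ := (pg2 flags).mp hg
            exact absurd (hmin f hfm 2 hfr) (by omega) : False)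
      have hf3 : ¬ ("missing_program" ∈ flags) := fun hg =>
        (by obtain ⟨f, hfm, hfr⟩ := (pg3 flags).mp hg
            exact absurd (hmin f hfm 3 hfr) (by omega) : False)
      have hf4 : ¬ ("missing_school_type" ∈ flags) := fun hg =>
        (by obtain ⟨f, hfm, hfr⟩ := (pg4 flags).mp hg
            exact absurd (hmin f hfm 4 hfr) (by omega) : False)
      have hf5 : ¬ (("missing_citizenship_status" ∈ flags ∨ "unrecognized_citizenship_status" ∈ flags)) := fun hg =>
        (by obtain ⟨f, hfm, hfr⟩ := (pg5 flags).mp hg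
            exact absurd (hmin f hfm 5 hfr) (by omega) : False)
      have hf6 : ¬ ("missing_referral_source" ∈ flags) := fun hg =>
        (by obtain ⟨f, hfm, hfr⟩ := (pg6 flags).mp hg
            exact absurd (hmin f hfm 6 hfr) (by omega) : False)
      have hf7 : ¬ (∃ f ∈ flags, f = "duplicate_email" ∨ f = "duplicate_applicant_id" ∨ f = "duplicate_phone") := fun hg =>
        (by obtain ⟨f, hfm, hfr⟩ := (pg7 flags).mp hg
            exact absurd (hmin f hfm 7 hfr) (by omega) : False)
      simp [recommended_action, hE, ht, hf0, hf1, hf2, hf3, hf4, hf5, hf6, hf7, ACTIONS]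
    · -- x = 9
      have ht : (∃ f ∈ flags, f = "missing_graduation_year" ∨ f = "invalid_graduation_year") := (pg9 flags).mpr hsome
      have hf0 : ¬ (∃ f ∈ flags, f = "missing_email" ∨ f = "missing_phone") := fun hg =>
        (by obtain ⟨f, hfm, hfr⟩ := (pg0 flags).mp hg
            exact absurd (hmin f hfm 0 hfr) (by omega) : False)
      have hf1 : ¬ (∃ f ∈ flags, f = "invalid_email" ∨ f = "invalid_phone") := fun hg =>
        (by obtain ⟨f, hfm, hfr⟩ := (pg1 flags).mp hg
            exact absurd (hmin f hfm 1 hfr) (by omega) : False)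
      have hf2 : ¬ (("missing_submission_date" ∈ flags ∨ "invalid_submission_date" ∈ flags)) := fun hg =>
        (by obtain ⟨f, hfm, hfr⟩ := (pg2 flags).mp hg
            exact absurd (hmin f hfm 2 hfr) (by omega) : False)
      have hf3 : ¬ ("missing_program" ∈ flags) := fun hg =>
        (by obtain ⟨f, hfm, hfr⟩ := (pg3 flags).mp hg
            exact absurd (hmin f hfm 3 hfr) (by omega) : False)
      have hf4 : ¬ ("missing_school_type" ∈ flags) := fun hg =>
        (by obtain ⟨f, hfm, hfr⟩ := (pg4 flags).mp hg
            exact absurd (hmin f hfm 4 hfr) (by omega) : False)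
      have hf5 : ¬ (("missing_citizenship_status" ∈ flags ∨ "unrecognized_citizenship_status" ∈ flags)) := fun hg =>
        (by obtain ⟨f, hfm, hfr⟩ := (pg5 flags).mp hg
            exact absurd (hmin f hfm 5 hfr) (by omega) : False)
      have hf6 : ¬ ("missing_referral_source" ∈ flags) := fun hg =>
        (by obtain ⟨f, hfm, hfr⟩ := (pg6 flags).mp hg
            exact absurd (hmin f hfm 6 hfr) (by omega) : False)
      have hf7 : ¬ (∃ f ∈ flags, f = "duplicate_email" ∨ f = "duplicate_applicant_id" ∨ f = "duplicate_phone") := fun hg =>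
        (by obtain ⟨f, hfm, hfr⟩ := (pg7 flags).mp hg
            exact absurd (hmin f hfm 7 hfr) (by omega) : False)
      have hf8 : ¬ (∃ f ∈ flags, f = "low_gpa" ∨ f = "invalid_gpa" ∨ f = "gpa_out_of_range") := fun hg =>
        (by obtain ⟨f, hfm, hfr⟩ := (pg8 flags).mp hg
            exact absurd (hmin f hfm 8 hfr) (by omega) : False)
      simp [recommended_action, hE, ht, hf0, hf1, hf2, hf3, hf4, hf5, hf6, hf7, hf8, ACTIONS]
    · -- x = 10
      have ht : ("graduation_year_out_of_range" ∈ flags) := (pg10 flags).mpr hsome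
      have hf0 : ¬ (∃ f ∈ flags, f = "missing_email" ∨ f = "missing_phone") := fun hg =>
        (by obtain ⟨f, hfm, hfr⟩ := (pg0 flags).mp hg
            exact absurd (hmin f hfm 0 hfr) (by omega) : False)
      have hf1 : ¬ (∃ f ∈ flags, f = "invalid_email" ∨ f = "invalid_phone") := fun hg =>
        (by obtain ⟨f, hfm, hfr⟩ := (pg1 flags).mp hg
            exact absurd (hmin f hfm 1 hfr) (by omega) : False)
      have hf2 : ¬ (("missing_submission_date" ∈ flags ∨ "invalid_submission_date" ∈ flags)) := fun hg =>
        (by obtain ⟨f, hfm, hfr⟩ := (pg2 flags).mp hg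
            exact absurd (hmin f hfm 2 hfr) (by omega) : False)
      have hf3 : ¬ ("missing_program" ∈ flags) := fun hg =>
        (by obtain ⟨f, hfm, hfr⟩ := (pg3 flags).mp hg
            exact absurd (hmin f hfm 3 hfr) (by omega) : False)
      have hf4 : ¬ ("missing_school_type" ∈ flags) := fun hg =>
        (by obtain ⟨f, hfm, hfr⟩ := (pg4 flags).mp hg
            exact absurd (hmin f hfm 4 hfr) (by omega) : False)
      have hf5 : ¬ (("missing_citizenship_status" ∈ flags ∨ "unrecognized_citizenship_status" ∈ flags)) := fun hg =>
        (by obtain ⟨f, hfm, hfr⟩ := (pg5 flags).mp hg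
            exact absurd (hmin f hfm 5 hfr) (by omega) : False)
      have hf6 : ¬ ("missing_referral_source" ∈ flags) := fun hg =>
        (by obtain ⟨f, hfm, hfr⟩ := (pg6 flags).mp hg
            exact absurd (hmin f hfm 6 hfr) (by omega) : False)
      have hf7 : ¬ (∃ f ∈ flags, f = "duplicate_email" ∨ f = "duplicate_applicant_id" ∨ f = "duplicate_phone") := fun hg =>
        (by obtain ⟨f, hfm, hfr⟩ := (pg7 flags).mp hg
            exact absurd (hmin f hfm 7 hfr) (by omega) : False)
      have hf8 : ¬ (∃ f ∈ flags, f = "low_gpa" ∨ f = "invalid_gpa" ∨ f = "gpa_out_of_range") := fun hg =>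
        (by obtain ⟨f, hfm, hfr⟩ := (pg8 flags).mp hg
            exact absurd (hmin f hfm 8 hfr) (by omega) : False)
      have hf9 : ¬ (∃ f ∈ flags, f = "missing_graduation_year" ∨ f = "invalid_graduation_year") := fun hg =>
        (by obtain ⟨f, hfm, hfr⟩ := (pg9 flags).mp hg
            exact absurd (hmin f hfm 9 hfr) (by omega) : False)
      simp [recommended_action, hE, ht, hf0, hf1, hf2, hf3, hf4, hf5, hf6, hf7, hf8, hf9, ACTIONS]
    · -- x = 11
      have ht : ("stale_submission" ∈ flags) := (pg11 flags).mpr hsome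
      have hf0 : ¬ (∃ f ∈ flags, f = "missing_email" ∨ f = "missing_phone") := fun hg =>
        (by obtain ⟨f, hfm, hfr⟩ := (pg0 flags).mp hg
            exact absurd (hmin f hfm 0 hfr) (by omega) : False)
      have hf1 : ¬ (∃ f ∈ flags, f = "invalid_email" ∨ f = "invalid_phone") := fun hg =>
        (by obtain ⟨f, hfm, hfr⟩ := (pg1 flags).mp hg
            exact absurd (hmin f hfm 1 hfr) (by omega) : False)
      have hf2 : ¬ (("missing_submission_date" ∈ flags ∨ "invalid_submission_date" ∈ flags)) := fun hg =>
        (by obtain ⟨f, hfm, hfr⟩ := (pg2 flags).mp hg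
            exact absurd (hmin f hfm 2 hfr) (by omega) : False)
      have hf3 : ¬ ("missing_program" ∈ flags) := fun hg =>
        (by obtain ⟨f, hfm, hfr⟩ := (pg3 flags).mp hg
            exact absurd (hmin f hfm 3 hfr) (by omega) : False)
      have hf4 : ¬ ("missing_school_type" ∈ flags) := fun hg =>
        (by obtain ⟨f, hfm, hfr⟩ := (pg4 flags).mp hg
            exact absurd (hmin f hfm 4 hfr) (by omega) : False)
      have hf5 : ¬ (("missing_citizenship_status" ∈ flags ∨ "unrecognized_citizenship_status" ∈ flags)) := fun hg =>
        (by obtain ⟨f, hfm, hfr⟩ := (pg5 flags).mp hg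
            exact absurd (hmin f hfm 5 hfr) (by omega) : False)
      have hf6 : ¬ ("missing_referral_source" ∈ flags) := fun hg =>
        (by obtain ⟨f, hfm, hfr⟩ := (pg6 flags).mp hg
            exact absurd (hmin f hfm 6 hfr) (by omega) : False)
      have hf7 : ¬ (∃ f ∈ flags, f = "duplicate_email" ∨ f = "duplicate_applicant_id" ∨ f = "duplicate_phone") := fun hg =>
        (by obtain ⟨f, hfm, hfr⟩ := (pg7 flags).mp hg
            exact absurd (hmin f hfm 7 hfr) (by omega) : False)
      have hf8 : ¬ (∃ f ∈ flags, f = "low_gpa" ∨ f = "invalid_gpa" ∨ f = "gpa_out_of_range") := fun hg =>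
        (by obtain ⟨f, hfm, hfr⟩ := (pg8 flags).mp hg
            exact absurd (hmin f hfm 8 hfr) (by omega) : False)
      have hf9 : ¬ (∃ f ∈ flags, f = "missing_graduation_year" ∨ f = "invalid_graduation_year") := fun hg =>
        (by obtain ⟨f, hfm, hfr⟩ := (pg9 flags).mp hg
            exact absurd (hmin f hfm 9 hfr) (by omega) : False)
      have hf10 : ¬ ("graduation_year_out_of_range" ∈ flags) := fun hg =>
        (by obtain ⟨f, hfm, hfr⟩ := (pg10 flags).mp hg
            exact absurd (hmin f hfm 10 hfr) (by omega) : False)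
      simp [recommended_action, hE, ht, hf0, hf1, hf2, hf3, hf4, hf5, hf6, hf7, hf8, hf9, hf10, ACTIONS]
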